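-- pv_equiv track=rewrite | github.com/wdi2020/wdi_python | cwiczenia2020/Cwiczenia 6/cw27.py | reku
-- ===== SOURCE A (Python) =====
-- def check(t):
--     suma = 0
--     for i in range(13):
--         #suma
--         suma += abs((t[i][0] - t[i][1]) * (t[i][2]-t[i][3]))
--         for j in range(i+1,13):
--             #czy nachodza
--             if t[j][0] > t[i][0] and t[j][0] < t[i][1] and ((t[j][2] > t[i][2] and t[j][2] < t[i][3]) or(t[j][3] > t[i][2] and t[j][3]<t[i][3])):
--                 return False
--             elif t[j][1] > t[i][0] and t[j][1] < t[i][1] and ((t[j][2] > t[i][2] and t[j][2] < t[i][3]) or(t[j][3] > t[i][2] and t[j][3]<t[i][3])):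
--                 return False
--     if suma == 2012:
--         return True
--     return False
--
-- def reku(tab,pomc,index):
--     if len(pomc) == 13:
--         return check(pomc)
--     if index == len(tab):
--         return False
--     a = reku(tab,pomc,index+1)
--     pomc.append(tab[index])
--     b = reku(tab,pomc,index+1)
--     pomc.pop()
--     return a or b
-- ===== SOURCE B (Python) =====
-- def overlaps(p, q):
--     return ((q[0] > p[0] and q[0] < p[1]) or (q[1] > p[0] and q[1] < p[1])) and \
--            ((q[2] > p[2] and q[2] < p[3]) or (q[3] > p[2] and q[3] < p[3]))
--
-- def check(t):
--     if any(overlaps(t[i], t[j]) for i in range(13) for j in range(i + 1, 13)):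
--         return False
--     return sum(abs((a - b) * (c - d)) for (a, b, c, d) in t[:13]) == 2012
--
-- def reku(tab, pomc, index):
--     # Iterative Pascal-style DP instead of include/exclude recursion: rows[j] holds
--     # every j-element combination (in position order) of tab[i] for i in range(index, len(tab)).
--     need = 13 - len(pomc)
--     if need < 0:
--         return False
--     if need == 0:
--         return check(pomc)
--     rows = [[[]]] + [[] for _ in range(need)]
--     for i in range(index, len(tab)):
--         x = tab[i]
--         for j in range(need, 0, -1):
--             rows[j] = rows[j] + [c + [x] for c in rows[j - 1]]
--     return any(check(pomc + c) for c in rows[need])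
-- ===== Notes on version B (the rewrite author's own statement) =====
-- stated objective: alternative
-- what changed: Replaces the binary include/exclude recursion that mutates pomc with a flat iterative Pascal-style DP over positions (rows[j] = all j-element combinations of items seen so far, then check each candidate), and restructures check into a flat any-over-pairs overlap test plus one comprehension sum with the two symmetric overlap branches merged into one predicate. Pre_ excludes exactly the inputs where A raises: when len(pomc) != 13, indices above len(tab) (RecursionError) or below -len(tab) (IndexError).
import Mathlib
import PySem

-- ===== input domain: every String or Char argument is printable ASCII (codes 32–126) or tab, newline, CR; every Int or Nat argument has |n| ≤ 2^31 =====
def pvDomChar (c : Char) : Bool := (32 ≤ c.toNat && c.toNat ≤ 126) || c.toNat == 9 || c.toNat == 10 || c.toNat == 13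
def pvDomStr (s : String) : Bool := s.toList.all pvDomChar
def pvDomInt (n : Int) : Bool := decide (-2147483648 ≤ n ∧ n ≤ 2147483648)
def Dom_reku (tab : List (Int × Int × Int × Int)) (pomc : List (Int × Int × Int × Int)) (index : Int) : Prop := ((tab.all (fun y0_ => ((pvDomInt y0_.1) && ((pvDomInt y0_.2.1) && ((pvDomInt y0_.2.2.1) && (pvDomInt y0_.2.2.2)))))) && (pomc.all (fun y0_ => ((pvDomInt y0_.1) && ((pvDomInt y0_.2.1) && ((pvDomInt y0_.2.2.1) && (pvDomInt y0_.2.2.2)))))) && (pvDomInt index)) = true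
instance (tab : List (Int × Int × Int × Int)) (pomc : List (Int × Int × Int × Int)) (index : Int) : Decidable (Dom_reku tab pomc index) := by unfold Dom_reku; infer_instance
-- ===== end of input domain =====

-- B replaces A's include/exclude recursion (which mutates pomc — net-zero: append then pop)
-- by a flat Pascal-style DP over positions, and restructures check into a flat any-over-pairs
-- overlap test plus one sum; equal return value proved on Pre_.

-- ===== PORT A =====

-- t[i] for the in-range accesses check performs (check is only reached with 13-element lists)
def getT (t : List (Int × Int × Int × Int)) (i : Nat) : Int × Int × Int × Int :=
  t.getD i (0, 0, 0, 0)

-- inner 'for j in range(i+1,13)' with its two early 'return False' branches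
-- (Python re-indexes t[i]/t[j] at each use; so does this port)
def checkInner (t : List (Int × Int × Int × Int)) (i j : Nat) : Bool :=
  if j < 13 then
    if (getT t j).1 > (getT t i).1 && (getT t j).1 < (getT t i).2.1 &&
        (((getT t j).2.2.1 > (getT t i).2.2.1 && (getT t j).2.2.1 < (getT t i).2.2.2) ||
         ((getT t j).2.2.2 > (getT t i).2.2.1 && (getT t j).2.2.2 < (getT t i).2.2.2)) then
      true
    else if (getT t j).2.1 > (getT t i).1 && (getT t j).2.1 < (getT t i).2.1 &&
        (((getT t j).2.2.1 > (getT t i).2.2.1 && (getT t j).2.2.1 < (getT t i).2.2.2) ||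
         ((getT t j).2.2.2 > (getT t i).2.2.1 && (getT t j).2.2.2 < (getT t i).2.2.2)) then
      true
    else checkInner t i (j + 1)
  else false
termination_by 13 - j

-- outer 'for i in range(13)' accumulating suma; 'return False' when the inner loop fired
def checkOuter (t : List (Int × Int × Int × Int)) (i : Nat) (suma : Int) : Bool :=
  if i < 13 then
    if checkInner t i (i + 1) then false
    else checkOuter t (i + 1) (suma + |((getT t i).1 - (getT t i).2.1) * ((getT t i).2.2.1 - (getT t i).2.2.2)|)
  else decide (suma = 2012)
termination_by 13 - i

def check (t : List (Int × Int × Int × Int)) : Bool := checkOuter t 0 0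

def reku (tab : List (Int × Int × Int × Int)) (pomc : List (Int × Int × Int × Int)) (index : Int) : Bool :=
  if pomc.length = 13 then check pomc
  else if index = tab.length then false
  else if h : -(tab.length : Int) ≤ index ∧ index < tab.length then
    -- a = reku(tab,pomc,index+1); pomc.append(tab[index]); b = reku(...); pomc.pop(); a or b
    reku tab pomc (index + 1) || reku tab (pomc ++ [PySem.List.pyGetD tab index (0, 0, 0, 0)]) (index + 1)
  else false  -- totality guard only: here Python raises (outside Pre_reku)
termination_by ((tab.length : Int) - index).toNat
decreasing_by all_goals omega

-- ===== PORT B =====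

-- B's merged overlap predicate (the two symmetric x-branches OR'd in front of the y-condition)
def overlapsB (p q : Int × Int × Int × Int) : Bool :=
  ((q.1 > p.1 && q.1 < p.2.1) || (q.2.1 > p.1 && q.2.1 < p.2.1)) &&
  ((q.2.2.1 > p.2.2.1 && q.2.2.1 < p.2.2.2) || (q.2.2.2 > p.2.2.1 && q.2.2.2 < p.2.2.2))

-- B's check: flat any over index pairs, then one comprehension sum
-- (t.getD is a totality default for t[i]; B only ever calls check on 13-element lists)
def check_alt (t : List (Int × Int × Int × Int)) : Bool :=
  if (List.range 13).any (fun i => (List.range' (i + 1) (13 - (i + 1))).any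
      (fun j => overlapsB (t.getD i (0, 0, 0, 0)) (t.getD j (0, 0, 0, 0)))) then false
  else decide ((((t.take 13).map (fun p => |(p.1 - p.2.1) * (p.2.2.1 - p.2.2.2)|)).sum : Int) = 2012)

-- 'for j in range(need, 0, -1): rows[j] = rows[j] + [c + [x] for c in rows[j-1]]'
def stepJ (x : Int × Int × Int × Int) (j : Nat)
    (rows : List (List (List (Int × Int × Int × Int)))) :
    List (List (List (Int × Int × Int × Int))) :=
  match j with
  | 0 => rows
  | jm + 1 =>
      stepJ x jm (rows.set (jm + 1) ((rows.getD (jm + 1) []) ++ (rows.getD jm []).map (fun c => c ++ [x])))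

def reku_alt (tab : List (Int × Int × Int × Int)) (pomc : List (Int × Int × Int × Int)) (index : Int) : Bool :=
  let need : Int := 13 - pomc.length
  if need < 0 then false
  else if need = 0 then check_alt pomc
  else
    let rows0 := [[([] : List (Int × Int × Int × Int))]] ++ List.replicate need.toNat []
    let rows := (PySem.List.pyRange index tab.length).foldl
      (fun r i => stepJ (PySem.List.pyGetD tab i (0, 0, 0, 0)) need.toNat r) rows0
    (rows.getD need.toNat []).any (fun c => check_alt (pomc ++ c))

-- ===== PRECONDITION & SPEC =====
-- Pre_ excludes exactly the inputs on which A raises (when len(pomc) ≠ 13): for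
-- index > len(tab) the recursion never reaches its base case (RecursionError), and for
-- index < -len(tab) A's pomc.append(tab[index]) raises IndexError.
def Pre_reku (tab : List (Int × Int × Int × Int)) (pomc : List (Int × Int × Int × Int)) (index : Int) : Prop :=
  pomc.length = 13 ∨ (-(tab.length : Int) ≤ index ∧ index ≤ tab.length)
instance (tab : List (Int × Int × Int × Int)) (pomc : List (Int × Int × Int × Int)) (index : Int) : Decidable (Pre_reku tab pomc index) := by unfold Pre_reku; infer_instance

def pvWitness_reku : (List (Int × Int × Int × Int)) × (List (Int × Int × Int × Int)) × Int :=
  ([(0, 1, 0, 1), (2, 3, 2, 3)], [], 1)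

def Spec_reku (tab : List (Int × Int × Int × Int)) (pomc : List (Int × Int × Int × Int)) (index : Int) (out : Bool) : Prop := out = reku_alt tab pomc index
instance (tab : List (Int × Int × Int × Int)) (pomc : List (Int × Int × Int × Int)) (index : Int) (out : Bool) : Decidable (Spec_reku tab pomc index out) := by unfold Spec_reku; infer_instance

-- ===== CLAIM (what is proved, stated in full; the proofs are below) =====
def Claim_equal_reku : Prop := ∀ (tab : List (Int × Int × Int × Int)) (pomc : List (Int × Int × Int × Int)) (index : Int), Dom_reku tab pomc index → Pre_reku tab pomc index → Spec_reku tab pomc index (reku tab pomc index)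

-- ===== LEMMAS AND PROOFS =====

-- ---- check = check_alt ----

def areaOf (p : Int × Int × Int × Int) : Int := |(p.1 - p.2.1) * (p.2.2.1 - p.2.2.2)|

theorem checkInner_eq (t : List (Int × Int × Int × Int)) (i : Nat) :
    ∀ fuel j, 13 - j ≤ fuel →
      checkInner t i j = (List.range' j (13 - j)).any
        (fun k => overlapsB (getT t i) (getT t k)) := by
  intro fuel
  induction fuel with
  | zero =>
      intro j hj
      have h13 : ¬ j < 13 := by omega
      rw [checkInner, if_neg h13]
      have : 13 - j = 0 := by omega
      rw [this]
      rfl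
  | succ n ih =>
      intro j hj
      by_cases hlt : j < 13
      · have hr : 13 - j = (13 - (j + 1)) + 1 := by omega
        rw [hr, List.range'_succ]
        simp only [List.any_cons]
        rw [checkInner, if_pos hlt, ih (j + 1) (by omega)]
        split_ifs with h1 h2
        · symm
          rw [Bool.or_eq_true]
          left
          simp only [overlapsB, Bool.and_eq_true, Bool.or_eq_true, decide_eq_true_eq] at h1 ⊢
          tauto
        · symm
          rw [Bool.or_eq_true]
          left
          simp only [overlapsB, Bool.and_eq_true, Bool.or_eq_true, decide_eq_true_eq] at h2 ⊢
          tauto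
        · cases hX : overlapsB (getT t i) (getT t j) with
          | false => rw [Bool.false_or]
          | true =>
              exfalso
              simp only [overlapsB, Bool.and_eq_true, Bool.or_eq_true, decide_eq_true_eq] at hX
              simp only [Bool.and_eq_true, Bool.or_eq_true, decide_eq_true_eq, not_and, not_or] at h1 h2
              tauto
      · rw [checkInner, if_neg hlt]
        have : 13 - j = 0 := by omega
        rw [this]
        rfl

theorem checkOuter_eq (t : List (Int × Int × Int × Int)) :
    ∀ fuel i suma, 13 - i ≤ fuel →
      checkOuter t i suma =
        if (List.range' i (13 - i)).any (fun a => (List.range' (a + 1) (13 - (a + 1))).any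
            (fun j => overlapsB (getT t a) (getT t j))) then false
        else decide (suma + ((List.range' i (13 - i)).map (fun k => areaOf (getT t k))).sum = 2012) := by
  intro fuel
  induction fuel with
  | zero =>
      intro i suma hf
      have h13 : ¬ i < 13 := by omega
      have h0 : 13 - i = 0 := by omega
      rw [checkOuter, if_neg h13, h0]
      simp
  | succ n ih =>
      intro i suma hf
      by_cases hlt : i < 13
      · have hr : 13 - i = (13 - (i + 1)) + 1 := by omega
        rw [hr, List.range'_succ]
        simp only [List.any_cons, List.map_cons, List.sum_cons]
        rw [checkOuter, if_pos hlt, checkInner_eq t i (13 - (i + 1)) (i + 1) (le_refl _)]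
        by_cases hb : ((List.range' (i + 1) (13 - (i + 1))).any
            (fun k => overlapsB (getT t i) (getT t k))) = true
        · rw [hb]
          simp
        · rw [Bool.not_eq_true] at hb
          rw [hb, Bool.false_or, ih (i + 1) _ (by omega)]
          rw [if_neg (by simp)]
          split_ifs with h
          · rfl
          · exact decide_eq_decide.mpr (by simp only [areaOf, add_assoc])
      · have h0 : 13 - i = 0 := by omega
        rw [checkOuter, if_neg hlt, h0]
        simp

theorem sum_range_getT (t : List (Int × Int × Int × Int)) :
    ∀ n, ((List.range n).map (fun k => areaOf (getT t k))).sum = ((t.take n).map areaOf).sum := by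
  intro n
  induction n with
  | zero => simp
  | succ n ih =>
      rw [List.range_succ, List.take_add_one, List.map_append, List.map_append,
        List.sum_append, List.sum_append, ih]
      cases h : t[n]? with
      | none => simp [getT, List.getD_eq_getElem?_getD, h, areaOf]
      | some x => simp [getT, List.getD_eq_getElem?_getD, h]

theorem check_eq (t : List (Int × Int × Int × Int)) : check t = check_alt t := by
  have hs := sum_range_getT t 13
  rw [List.range_eq_range'] at hs
  simp only [getT, areaOf] at hs
  rw [check, checkOuter_eq t 13 0 0 (le_refl _), check_alt, List.range_eq_range']
  simp only [Nat.sub_zero, getT, areaOf]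
  split_ifs with h
  · rfl
  · exact decide_eq_decide.mpr (by rw [zero_add, hs]; exact Iff.rfl)

-- ---- B's DP rows invariant ----

theorem pvGetD_set (l : List (List (List (Int × Int × Int × Int)))) (i j : Nat)
    (a : List (List (Int × Int × Int × Int))) :
    (l.set i a).getD j [] = if i = j ∧ i < l.length then a else l.getD j [] := by
  by_cases hij : i = j
  · subst hij
    by_cases h : i < l.length
    · simp [List.getD_eq_getElem?_getD, h]
    · rw [List.set_eq_of_length_le (by omega), if_neg (by tauto)]
  · simp [List.getD_eq_getElem?_getD, hij]

theorem pvConsRep_getD (x : List (List (Int × Int × Int × Int))) (n i : Nat) :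
    ((x :: List.replicate n ([] : List (List (Int × Int × Int × Int)))).getD i []) =
      if i = 0 then x else [] := by
  cases i with
  | zero => simp
  | succ m =>
      simp [List.getD_eq_getElem?_getD, List.getElem?_replicate]
      split <;> simp

theorem pvSublist_concat (c ys : List (Int × Int × Int × Int)) (x : Int × Int × Int × Int) :
    List.Sublist c (ys ++ [x]) ↔
      List.Sublist c ys ∨ ∃ c', c = c' ++ [x] ∧ List.Sublist c' ys := by
  rw [← List.reverse_sublist, List.reverse_append]
  simp only [List.reverse_cons, List.reverse_nil, List.nil_append, List.singleton_append]
  rw [List.sublist_cons_iff]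
  constructor
  · rintro (h | ⟨s, hs, h⟩)
    · left; rwa [List.reverse_sublist] at h
    · right
      refine ⟨s.reverse, ?_, by rwa [← List.reverse_sublist, List.reverse_reverse] at h⟩
      have := congrArg List.reverse hs
      simpa using this
  · rintro (h | ⟨c', rfl, h⟩)
    · left; rwa [List.reverse_sublist]
    · right; exact ⟨c'.reverse, by simp, by rwa [List.reverse_sublist]⟩

theorem stepJ_length (x : Int × Int × Int × Int) (j : Nat)
    (rows : List (List (List (Int × Int × Int × Int)))) :
    (stepJ x j rows).length = rows.length := by
  induction j generalizing rows with
  | zero => rfl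
  | succ j ih => simp [stepJ, ih]

theorem stepJ_getD (x : Int × Int × Int × Int) (j : Nat)
    (rows : List (List (List (Int × Int × Int × Int)))) (hj : j < rows.length) (i : Nat) :
    (stepJ x j rows).getD i [] =
      if 1 ≤ i ∧ i ≤ j then
        rows.getD i [] ++ (rows.getD (i - 1) []).map (fun c => c ++ [x])
      else rows.getD i [] := by
  induction j generalizing rows with
  | zero => rw [stepJ, if_neg (by omega)]
  | succ j ih =>
      rw [stepJ]
      rw [ih _ (by simp; omega)]
      by_cases hi1 : 1 ≤ i ∧ i ≤ j
      · rw [if_pos hi1, if_pos (by omega),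
          pvGetD_set, if_neg (by omega), pvGetD_set, if_neg (by omega)]
      · by_cases hi2 : i = j + 1
        · subst hi2
          rw [if_neg hi1, if_pos (by omega), pvGetD_set, if_pos (by omega)]
          simp
        · rw [if_neg hi1, if_neg (by omega), pvGetD_set, if_neg (by omega)]

-- invariant of B's pass: row i holds exactly the i-element sublists of the items seen so far
def InvRows (need : Nat) (ys : List (Int × Int × Int × Int))
    (rows : List (List (List (Int × Int × Int × Int)))) : Prop :=
  rows.length = need + 1 ∧
    ∀ i ≤ need, ∀ c, c ∈ rows.getD i [] ↔ (List.Sublist c ys ∧ c.length = i)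

theorem inv_init (need : Nat) :
    InvRows need [] ([[([] : List (Int × Int × Int × Int))]] ++ List.replicate need []) := by
  constructor
  · simp
  · intro i hi c
    have : ([[([] : List (Int × Int × Int × Int))]] ++ List.replicate need []) =
        [([] : List (Int × Int × Int × Int))] :: List.replicate need [] := rfl
    rw [this, pvConsRep_getD]
    by_cases h0 : i = 0
    · subst h0
      simp [List.sublist_nil, List.length_eq_zero_iff]
    · rw [if_neg h0]
      simp only [List.not_mem_nil, false_iff, not_and]
      intro hs
      have : c = [] := List.sublist_nil.mp hs
      subst this
      simp only [List.length_nil]; omega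

theorem inv_step (need : Nat) (ys : List (Int × Int × Int × Int))
    (rows : List (List (List (Int × Int × Int × Int)))) (x : Int × Int × Int × Int)
    (h : InvRows need ys rows) : InvRows need (ys ++ [x]) (stepJ x need rows) := by
  obtain ⟨hlen, hmem⟩ := h
  constructor
  · rw [stepJ_length, hlen]
  · intro i hi c
    rw [stepJ_getD _ _ _ (by omega)]
    by_cases h0 : i = 0
    · subst h0
      rw [if_neg (by omega), hmem 0 (by omega)]
      constructor
      · rintro ⟨hs, hl⟩
        exact ⟨hs.trans (List.sublist_append_left _ _), hl⟩
      · rintro ⟨hs, hl⟩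
        have : c = [] := List.length_eq_zero_iff.mp hl
        subst this
        exact ⟨List.nil_sublist _, rfl⟩
    · rw [if_pos (by omega)]
      simp only [List.mem_append, List.mem_map]
      rw [hmem i hi]
      constructor
      · rintro (⟨hs, hl⟩ | ⟨c', hc', rfl⟩)
        · exact ⟨hs.trans (List.sublist_append_left _ _), hl⟩
        · rw [hmem (i - 1) (by omega)] at hc'
          obtain ⟨hs, hl⟩ := hc'
          refine ⟨?_, by simp [hl]; omega⟩
          exact (pvSublist_concat _ _ _).mpr (Or.inr ⟨c', rfl, hs⟩)
      · rintro ⟨hs, hl⟩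
        rcases (pvSublist_concat _ _ _).mp hs with h' | ⟨c', rfl, h'⟩
        · exact Or.inl ⟨h', hl⟩
        · right
          refine ⟨c', ?_, rfl⟩
          rw [hmem (i - 1) (by omega)]
          exact ⟨h', by simp at hl; omega⟩

theorem inv_fold (need : Nat) (xs ys : List (Int × Int × Int × Int))
    (rows : List (List (List (Int × Int × Int × Int))))
    (h : InvRows need ys rows) :
    InvRows need (ys ++ xs) (xs.foldl (fun r x => stepJ x need r) rows) := by
  induction xs generalizing ys rows with
  | nil => simpa using h
  | cons x xs ih =>
      have := ih (ys ++ [x]) _ (inv_step need ys rows x h)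
      simpa using this

-- ---- the item sequence both programs traverse ----

-- tab[i] for -len ≤ i < 0 (Python wraparound)
theorem pvGetD_neg (tab : List (Int × Int × Int × Int)) (index : Int)
    (d : Int × Int × Int × Int) (h0 : -(tab.length : Int) ≤ index) (h1 : index < 0) :
    PySem.List.pyGetD tab index d = tab.getD ((tab.length : Int) + index).toNat d := by
  simp only [PySem.List.pyGetD, PySem.List.pyGet?, PySem.List.pyIdx?,
    if_neg (by omega : ¬ 0 ≤ index), if_pos h0, List.getD_eq_getElem?_getD]
  have : tab.length - (-index).toNat = ((tab.length : Int) + index).toNat := by omega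
  rw [this]
  simp

-- the sequence of items A's recursion offers from position index on (wraparound included)
def seqFrom (tab : List (Int × Int × Int × Int)) (index : Int) : List (Int × Int × Int × Int) :=
  if index < 0 then tab.drop ((tab.length : Int) + index).toNat ++ tab else tab.drop index.toNat

theorem seq_cons (tab : List (Int × Int × Int × Int)) (index : Int)
    (h0 : -(tab.length : Int) ≤ index) (h1 : index < tab.length) :
    seqFrom tab index = PySem.List.pyGetD tab index (0, 0, 0, 0) :: seqFrom tab (index + 1) := by
  by_cases hneg : index < 0
  · have hm : ((tab.length : Int) + index).toNat < tab.length := by omega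
    rw [seqFrom, if_pos hneg, pvGetD_neg tab index _ h0 hneg,
      List.getD_eq_getElem tab _ hm, List.drop_eq_getElem_cons hm]
    by_cases hz : index + 1 < 0
    · rw [seqFrom, if_pos hz]
      have : ((tab.length : Int) + (index + 1)).toNat = ((tab.length : Int) + index).toNat + 1 := by
        omega
      rw [this]
      rfl
    · have hz' : index + 1 = 0 := by omega
      rw [seqFrom, if_neg hz, hz']
      have : ((tab.length : Int) + index).toNat + 1 = tab.length := by omega
      rw [this, List.drop_length]
      rfl
  · have hnat : index.toNat < tab.length := by omega
    rw [seqFrom, if_neg hneg, PySem.List.pyGetD_eq_getElem tab _ (by omega) (by exact_mod_cast h1),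
      List.drop_eq_getElem_cons hnat, seqFrom, if_neg (by omega)]
    have : (index + 1).toNat = index.toNat + 1 := by omega
    rw [this]

-- B reads the same item sequence through range(index, len(tab)) and tab[i]
theorem items_eq (tab : List (Int × Int × Int × Int)) (fuel : Nat) :
    ∀ (index : Int), ((tab.length : Int) - index).toNat ≤ fuel →
      -(tab.length : Int) ≤ index → index ≤ tab.length →
      (PySem.List.pyRange index tab.length).map
          (fun i => PySem.List.pyGetD tab i (0, 0, 0, 0)) = seqFrom tab index := by
  induction fuel with
  | zero =>
      intro index hm h0 h1
      have hi : index = (tab.length : Int) := by omega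
      rw [hi, PySem.List.pyRange_one_eq_nil (le_refl _), seqFrom, if_neg (by omega)]
      have : ((tab.length : Int)).toNat = tab.length := by omega
      rw [this, List.drop_length]
      rfl
  | succ n ih =>
      intro index hm h0 h1
      by_cases hi : index = (tab.length : Int)
      · rw [hi, PySem.List.pyRange_one_eq_nil (le_refl _), seqFrom, if_neg (by omega)]
        have : ((tab.length : Int)).toNat = tab.length := by omega
        rw [this, List.drop_length]
        rfl
      · have hlt : index < (tab.length : Int) := by omega
        rw [PySem.List.pyRange_one_cons hlt, List.map_cons,
          ih (index + 1) (by omega) (by omega) (by omega),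
          seq_cons tab index h0 hlt]

-- ---- characterisations of A and B ----

-- B computes: some (13 - len(pomc))-element sublist of the item sequence extends pomc to a good 13-set
theorem alt_char (tab pomc : List (Int × Int × Int × Int)) (index : Int)
    (hp : pomc.length ≤ 13) :
    (reku_alt tab pomc index = true ↔
      ∃ c, List.Sublist c ((PySem.List.pyRange index tab.length).map
          (fun i => PySem.List.pyGetD tab i (0, 0, 0, 0))) ∧
        c.length = 13 - pomc.length ∧ check_alt (pomc ++ c) = true) := by
  have hk : (13 - (pomc.length : Int)).toNat = 13 - pomc.length := by omega
  rw [reku_alt]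
  simp only [if_neg (show ¬(13 - (pomc.length : Int) < 0) by omega), hk]
  by_cases h13 : pomc.length = 13
  · rw [if_pos (by omega : (13 : Int) - (pomc.length : Int) = 0)]
    constructor
    · intro hc
      exact ⟨[], List.nil_sublist _, by simp [h13], by simpa using hc⟩
    · rintro ⟨c, _, hl, hc⟩
      have : c = [] := List.length_eq_zero_iff.mp (by omega)
      subst this
      simpa using hc
  · rw [if_neg (by omega : ¬ (13 : Int) - (pomc.length : Int) = 0),
      ← List.foldl_map (f := fun i => PySem.List.pyGetD tab i (0, 0, 0, 0))
        (g := fun r x => stepJ x (13 - pomc.length) r)]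
    obtain ⟨hlen, hmem⟩ := inv_fold (13 - pomc.length)
      ((PySem.List.pyRange index tab.length).map
        (fun i => PySem.List.pyGetD tab i (0, 0, 0, 0)))
      [] _ (inv_init (13 - pomc.length))
    rw [List.any_eq_true]
    constructor
    · rintro ⟨c, hc, hchk⟩
      rw [hmem _ (le_refl _) c] at hc
      simp at hc
      exact ⟨c, hc.1, hc.2, hchk⟩
    · rintro ⟨c, hs, hl, hchk⟩
      refine ⟨c, ?_, hchk⟩
      rw [hmem _ (le_refl _) c]
      simpa using ⟨hs, hl⟩

theorem alt_long (tab pomc : List (Int × Int × Int × Int)) (index : Int)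
    (hp : 13 < pomc.length) : reku_alt tab pomc index = false := by
  rw [reku_alt]
  simp only [if_pos (show (13 - (pomc.length : Int) < 0) by omega)]

-- A's result on long pomc: once len(pomc) > 13 every branch bottoms out at False
theorem reku_long (tab : List (Int × Int × Int × Int)) (fuel : Nat) :
    ∀ (pomc : List (Int × Int × Int × Int)) (index : Int),
      ((tab.length : Int) - index).toNat ≤ fuel → 13 < pomc.length →
      reku tab pomc index = false := by
  induction fuel with
  | zero =>
      intro pomc index hm hp
      rw [reku, if_neg (by omega)]
      by_cases hi : index = (tab.length : Int)
      · rw [if_pos hi]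
      · rw [if_neg hi, dif_neg (by omega)]
  | succ n ih =>
      intro pomc index hm hp
      rw [reku, if_neg (by omega)]
      by_cases hi : index = (tab.length : Int)
      · rw [if_pos hi]
      · rw [if_neg hi]
        by_cases hg : -(tab.length : Int) ≤ index ∧ index < (tab.length : Int)
        · rw [dif_pos hg, ih pomc (index + 1) (by omega) hp,
            ih _ (index + 1) (by omega) (by simp; omega)]
          rfl
        · rw [dif_neg hg]

-- branch 'len(pomc) == 13: return check(pomc)' in characterised form
theorem reku_char_full (tab pomc : List (Int × Int × Int × Int)) (index : Int)
    (h13 : pomc.length = 13) :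
    (reku tab pomc index = true ↔
      ∃ c, List.Sublist c (seqFrom tab index) ∧ c.length = 13 - pomc.length ∧
        check (pomc ++ c) = true) := by
  rw [reku, if_pos h13]
  constructor
  · intro hc
    exact ⟨[], List.nil_sublist _, by simp [h13], by simpa using hc⟩
  · rintro ⟨c, _, hl, hc⟩
    have : c = [] := List.length_eq_zero_iff.mp (by omega)
    subst this
    simpa using hc

-- branch 'index == len(tab): return False' in characterised form
theorem reku_char_base (tab pomc : List (Int × Int × Int × Int)) (index : Int)
    (hi : index = (tab.length : Int)) (hp : pomc.length ≤ 13) :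
    (reku tab pomc index = true ↔
      ∃ c, List.Sublist c (seqFrom tab index) ∧ c.length = 13 - pomc.length ∧
        check (pomc ++ c) = true) := by
  by_cases h13 : pomc.length = 13
  · exact reku_char_full tab pomc index h13
  · rw [reku, if_neg h13, if_pos hi]
    have hnat : index.toNat = tab.length := by omega
    rw [seqFrom, if_neg (by omega), hnat, List.drop_length]
    simp only [Bool.false_eq_true, false_iff, not_exists]
    rintro c ⟨hs, hl, _⟩
    have : c = [] := List.sublist_nil.mp hs
    subst this
    simp only [List.length_nil] at hl
    omega

-- A computes: some (13 - len(pomc))-element sublist of tab[index:] extends pomc to a good 13-set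
theorem reku_char (tab : List (Int × Int × Int × Int)) (fuel : Nat) :
    ∀ (pomc : List (Int × Int × Int × Int)) (index : Int),
      ((tab.length : Int) - index).toNat ≤ fuel →
      -(tab.length : Int) ≤ index → index ≤ tab.length → pomc.length ≤ 13 →
      (reku tab pomc index = true ↔
        ∃ c, List.Sublist c (seqFrom tab index) ∧ c.length = 13 - pomc.length ∧
          check (pomc ++ c) = true) := by
  induction fuel with
  | zero =>
      intro pomc index hm h0 h1 hp
      exact reku_char_base tab pomc index (by omega) hp
  | succ n ih =>
      intro pomc index hm h0 h1 hp
      by_cases h13 : pomc.length = 13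
      · exact reku_char_full tab pomc index h13
      · by_cases hi : index = (tab.length : Int)
        · exact reku_char_base tab pomc index hi (by omega)
        · have hlt : index < (tab.length : Int) := by omega
          rw [reku, if_neg h13, if_neg hi, dif_pos ⟨h0, hlt⟩, Bool.or_eq_true,
            ih pomc (index + 1) (by omega) (by omega) (by omega) hp,
            ih (pomc ++ [PySem.List.pyGetD tab index (0, 0, 0, 0)]) (index + 1) (by omega)
              (by omega) (by omega) (by simp; omega),
            seq_cons tab index h0 hlt]
          constructor
          · rintro (⟨c, hs, hl, hc⟩ | ⟨c, hs, hl, hc⟩)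
            · exact ⟨c, hs.cons _, hl, hc⟩
            · refine ⟨PySem.List.pyGetD tab index (0, 0, 0, 0) :: c, hs.cons₂ _, ?_, ?_⟩
              · simp at hl ⊢; omega
              · rw [List.append_assoc] at hc
                simpa using hc
          · rintro ⟨c, hs, hl, hc⟩
            rcases List.sublist_cons_iff.mp hs with h' | ⟨s, rfl, hss⟩
            · exact Or.inl ⟨c, h', hl, hc⟩
            · right
              refine ⟨s, hss, by simp at hl ⊢; omega, ?_⟩
              rw [List.append_assoc]
              simpa using hc

-- ===== VERDICT (by name: the statement is the Claim_ definition above) =====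
theorem reku_spec : Claim_equal_reku := by
  intro tab pomc index _ hpre
  show reku tab pomc index = reku_alt tab pomc index
  rcases hpre with h13 | ⟨h0, h1⟩
  · -- len(pomc) == 13: both sides are check(pomc) resp. check_alt(pomc), whatever index is
    rw [reku, if_pos h13, check_eq]
    apply Bool.coe_iff_coe.mp
    rw [alt_char tab pomc index (by omega)]
    constructor
    · intro hc
      exact ⟨[], List.nil_sublist _, by simp [h13], by simpa using hc⟩
    · rintro ⟨c, _, hl, hc⟩
      have : c = [] := List.length_eq_zero_iff.mp (by omega)
      subst this
      simpa using hc
  · by_cases hp : pomc.length ≤ 13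
    · apply Bool.coe_iff_coe.mp
      rw [reku_char tab (((tab.length : Int) - index).toNat) pomc index (le_refl _) h0
          (by exact_mod_cast h1) hp,
        alt_char tab pomc index hp,
        items_eq tab (((tab.length : Int) - index).toNat) index (le_refl _) h0
          (by exact_mod_cast h1)]
      simp only [check_eq]
    · rw [reku_long tab (((tab.length : Int) - index).toNat) pomc index (le_refl _) (by omega),
        alt_long tab pomc index (by omega)]
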